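-- pv_equiv track=rewrite | github.com/Turing-Machine-Tutor/Turing-Machine-Tutor | src/tests/TuringMachineController_Tests.py | is_0n1n
-- ===== SOURCE A (Python) =====
-- def is_0n1n(s):
--     if(len(s) < 2):
--         return False
--     elif(len(s) == 2 and s != "01"):
--         return False
--     elif(len(s) == 2 and s == "01"):
--         return True
--     st = s.split('01')
--     if(len(st) != 2):
--         return False
--     if(len(st[0]) != len(st[1])):
--         return False
--     for i in st[0]:
--         if i != '0':
--             return False
--     for i in st[1]:
--         if i != '1':
--             return False
--     return True
-- ===== SOURCE B (Python) =====
-- def is_0n1n(s):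
--     n = len(s)
--     if n == 0 or n % 2 == 1:
--         return False
--     half = n // 2
--     return s == '0' * half + '1' * half
-- ===== Notes on version B (the rewrite author's own statement) =====
-- stated objective: simpler
-- what changed: Instead of splitting the input on the two-character separator and scanning both halves character-by-character, B builds the canonical zeros-then-ones string of the required length and compares it to the input in one shot.
import Mathlib
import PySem

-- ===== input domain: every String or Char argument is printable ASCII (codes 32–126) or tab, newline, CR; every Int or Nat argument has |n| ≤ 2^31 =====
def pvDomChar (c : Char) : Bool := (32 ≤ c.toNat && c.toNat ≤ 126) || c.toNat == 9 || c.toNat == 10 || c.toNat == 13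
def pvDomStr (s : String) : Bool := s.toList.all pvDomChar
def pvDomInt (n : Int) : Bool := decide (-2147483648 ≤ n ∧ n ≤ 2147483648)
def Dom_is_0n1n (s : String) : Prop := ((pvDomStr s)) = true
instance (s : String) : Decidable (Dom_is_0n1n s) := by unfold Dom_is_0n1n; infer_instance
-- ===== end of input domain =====

-- B replaces A's split-on-separator-and-scan-both-halves check by building the canonical
-- zeros-then-ones string of the same length and comparing it to s in one shot (objective: simpler).


-- ===== PORT A =====
def is_0n1n (s : String) : Bool :=
  if PySem.Str.len s < 2 then false
  else if PySem.Str.len s == 2 && s != "01" then false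
  else if PySem.Str.len s == 2 && s == "01" then true
  else
    -- st = s.split('01'); separator "01" is nonempty, so Python's split is Chars.splitOn
    let st := PySem.Chars.splitOn s.toList ['0', '1']
    if st.length != 2 then false
    else if (st.getD 0 []).length != (st.getD 1 []).length then false
    -- two early-return character loops, each = an `all` check
    else if !((st.getD 0 []).all (fun c => c == '0')) then false
    else if !((st.getD 1 []).all (fun c => c == '1')) then false
    else true

-- ===== PORT B =====
def is_0n1n_alt (s : String) : Bool :=
  let n := PySem.Str.len s
  if n == 0 || PySem.Int.mod n 2 == 1 then false
  else
    let half := PySem.Int.floordiv n 2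
    s == String.ofList (List.replicate half.toNat '0' ++ List.replicate half.toNat '1')

-- ===== PRECONDITION & SPEC =====
def Spec_is_0n1n (s : String) (out : Bool) : Prop := out = is_0n1n_alt s
instance (s : String) (out : Bool) : Decidable (Spec_is_0n1n s out) := by unfold Spec_is_0n1n; infer_instance

-- ===== CLAIM (what is proved, stated in full; the proofs are below) =====
def Claim_equal_is_0n1n : Prop := ∀ (s : String), Dom_is_0n1n s → Spec_is_0n1n s (is_0n1n s)

-- ===== LEMMAS AND PROOFS =====

-- the canonical-form predicate both programs decide
def Canon (l : List Char) : Prop :=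
  ∃ k : Nat, 1 ≤ k ∧ l = List.replicate k '0' ++ List.replicate k '1'

-- reference model of Chars.splitOn · ['0','1']
def pieces : List Char → List (List Char)
  | [] => [[]]
  | c :: rest =>
    if ['0', '1'].isPrefixOf (c :: rest) then [] :: pieces rest.tail
    else (pieces rest).modifyHead (c :: ·)
termination_by l => l.length
decreasing_by all_goals (simp only [List.length_tail, List.length_cons]; omega)

lemma pieces_ne_nil (l : List Char) : pieces l ≠ [] := by
  induction l using pieces.induct with
  | case1 => simp [pieces]
  | case2 c rest h ih => simp [pieces, h]
  | case3 c rest h ih =>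
    rw [pieces, if_neg h]
    cases hp : pieces rest with
    | nil => exact absurd hp ih
    | cons p ps => simp

lemma go_eq : ∀ (fuel : Nat) (l cur : List Char) (acc : List (List Char)),
    l.length < fuel →
    PySem.Chars.splitOn.go ['0', '1'] fuel l cur acc =
      acc.reverse ++ (pieces l).modifyHead (cur.reverse ++ ·) := by
  intro fuel
  induction fuel with
  | zero => intro l cur acc h; omega
  | succ fuel ih =>
    intro l cur acc h
    cases l with
    | nil => simp [PySem.Chars.splitOn.go, pieces]
    | cons c rest =>
      rw [PySem.Chars.splitOn.go]
      by_cases hp : ['0', '1'].isPrefixOf (c :: rest)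
      · cases rest with
        | nil => simp [List.isPrefixOf] at hp
        | cons d r' =>
          obtain ⟨h0, h1⟩ : '0' = c ∧ '1' = d := by simpa [List.isPrefixOf] using hp
          subst h0; subst h1
          rw [if_pos hp, pieces, if_pos hp]
          simp only [List.length_cons] at h
          rw [show List.drop (['0','1'] : List Char).length ('0' :: '1' :: r') = r' from rfl,
            ih r' [] (cur.reverse :: acc) (by omega)]
          rw [show ('1' :: r').tail = r' from rfl]
          cases hq : pieces r' with
          | nil => exact absurd hq (pieces_ne_nil r')
          | cons p ps => simp
      · rw [if_neg hp, pieces, if_neg hp,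
          ih rest (c :: cur) acc (by simp at h ⊢; omega)]
        cases hq : pieces rest with
        | nil => exact absurd hq (pieces_ne_nil rest)
        | cons p ps => simp

lemma splitOn_eq_pieces (l : List Char) :
    PySem.Chars.splitOn l ['0', '1'] = pieces l := by
  rw [PySem.Chars.splitOn, go_eq (l.length + 1) l [] [] (by omega)]
  cases hq : pieces l with
  | nil => exact absurd hq (pieces_ne_nil l)
  | cons p ps => simp

def joinPieces : List (List Char) → List Char
  | [] => []
  | [p] => p
  | p :: ps => p ++ '0' :: '1' :: joinPieces ps

lemma joinPieces_modifyHead (c : Char) (p : List Char) (ps : List (List Char)) :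
    joinPieces (List.modifyHead (c :: ·) (p :: ps)) = c :: joinPieces (p :: ps) := by
  cases ps <;> simp [joinPieces]

lemma joinPieces_pieces (l : List Char) : joinPieces (pieces l) = l := by
  induction l using pieces.induct with
  | case1 => simp [pieces, joinPieces]
  | case2 c rest hp ih =>
    rw [pieces, if_pos hp]
    cases rest with
    | nil => simp [List.isPrefixOf] at hp
    | cons d r' =>
      obtain ⟨h0, h1⟩ : '0' = c ∧ '1' = d := by simpa [List.isPrefixOf] using hp
      subst h0; subst h1
      simp only [List.tail_cons] at ih ⊢
      cases hq : pieces r' with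
      | nil => exact absurd hq (pieces_ne_nil r')
      | cons p ps => rw [hq] at ih; simp [joinPieces, ih]
  | case3 c rest hp ih =>
    rw [pieces, if_neg hp]
    cases hq : pieces rest with
    | nil => exact absurd hq (pieces_ne_nil rest)
    | cons p ps => rw [hq] at ih; rw [joinPieces_modifyHead, ih]

lemma pieces_ones (j : Nat) : pieces (List.replicate j '1') = [List.replicate j '1'] := by
  induction j with
  | zero => simp [pieces]
  | succ j ih =>
    rw [List.replicate_succ, pieces, if_neg (by simp [List.isPrefixOf]), ih]
    simp

lemma pieces_canon (a b : Nat) :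
    pieces (List.replicate a '0' ++ '0' :: '1' :: List.replicate b '1') =
      [List.replicate a '0', List.replicate b '1'] := by
  induction a with
  | zero =>
    rw [List.replicate_zero, List.nil_append, pieces,
      if_pos (by simp [List.isPrefixOf]), List.tail_cons, pieces_ones]
  | succ a ih =>
    obtain ⟨t, ht⟩ : ∃ t, List.replicate a '0' ++ '0' :: '1' :: List.replicate b '1' = '0' :: t := by
      cases a with
      | zero => exact ⟨'1' :: List.replicate b '1', rfl⟩
      | succ a => exact ⟨_, by rw [List.replicate_succ, List.cons_append]⟩
    rw [List.replicate_succ, List.cons_append, ht, pieces,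
      if_neg (by simp [List.isPrefixOf]), ← ht, ih]
    simp

lemma fmod_two (n : Int) : n.fmod 2 = n % 2 := by
  rw [Int.fmod_eq_emod]; simp

lemma fdiv_two (n : Int) : n.fdiv 2 = n / 2 := by
  rw [Int.fdiv_eq_ediv]; simp

lemma canon_length {l : List Char} (h : Canon l) : 2 ≤ l.length ∧ l.length % 2 = 0 := by
  obtain ⟨k, hk, rfl⟩ := h
  simp; omega

lemma a_iff_canon (s : String) : is_0n1n s = true ↔ Canon s.toList := by
  unfold is_0n1n
  simp only [PySem.Str.len, splitOn_eq_pieces]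
  by_cases h2 : ((s.toList.length : Int) < 2)
  · rw [if_pos h2]
    simp only [Bool.false_eq_true, false_iff]
    intro hc
    have := (canon_length hc).1
    omega
  · rw [if_neg h2]
    by_cases he : s.toList.length = 2
    · have e2 : (((s.toList.length : Int)) == 2) = true := by simp [he]
      by_cases hs : s = "01"
      · have c3 : (s == "01") = true := by simp [hs]
        have c2 : (s != "01") = false := by simp [hs]
        simp only [e2, c2, c3, Bool.and_false, Bool.and_self, Bool.false_eq_true, if_false,
          if_true, true_iff]
        exact ⟨1, le_refl 1, by rw [hs]; decide⟩
      · have c2 : (s != "01") = true := by simp [hs]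
        simp only [e2, c2, Bool.and_self, Bool.true_and, if_true]
        simp only [Bool.false_eq_true, false_iff]
        rintro ⟨k, hk, hl⟩
        have hlen := congrArg List.length hl
        simp only [he, List.length_append, List.length_replicate] at hlen
        have hk1 : k = 1 := by omega
        subst hk1
        apply hs
        have := congrArg String.ofList hl
        simpa using this
    · have e2 : (((s.toList.length : Int)) == 2) = false := by
        simp only [beq_eq_false_iff_ne, ne_eq]
        exact_mod_cast he
      have hlen3 : 3 ≤ s.toList.length := by omega
      simp only [e2, Bool.false_and, Bool.false_eq_true, if_false]
      constructor
      · intro hA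
        split_ifs at hA with h1 h2 h3 h4
        · simp only [Bool.not_eq_true, bne_eq_false_iff_eq] at h1
          obtain ⟨x, y, hp⟩ := List.length_eq_two.mp h1
          rw [hp] at h2 h3 h4
          simp at h2 h3 h4
          have hx : x = List.replicate x.length '0' := List.eq_replicate_of_mem h3
          have hy : y = List.replicate y.length '1' := List.eq_replicate_of_mem h4
          refine ⟨x.length + 1, by omega, ?_⟩
          have hj := joinPieces_pieces s.toList
          rw [hp] at hj
          simp only [joinPieces] at hj
          rw [← hj, List.replicate_succ', List.replicate_succ]
          conv_lhs => rw [hx, hy]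
          simp [h2]
      · rintro ⟨k, hk, hl⟩
        have hlen := congrArg List.length hl
        simp only [List.length_append, List.length_replicate] at hlen
        obtain ⟨m, rfl⟩ : ∃ m, k = m + 2 := ⟨k - 2, by omega⟩
        have hform : s.toList =
            List.replicate (m + 1) '0' ++ '0' :: '1' :: List.replicate (m + 1) '1' := by
          rw [hl]
          rw [show (m + 2) = (m + 1) + 1 from rfl, List.replicate_succ' (n := m + 1) (a := '0'),
            List.replicate_succ (n := m + 1) (a := '1')]
          simp
        rw [hform, pieces_canon]
        simp [List.all_eq_true]

lemma b_iff_canon (s : String) : is_0n1n_alt s = true ↔ Canon s.toList := by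
  unfold is_0n1n_alt
  simp only [PySem.Str.len, PySem.Int.mod, PySem.Int.floordiv, fmod_two, fdiv_two]
  split_ifs with h
  · simp only [Bool.false_eq_true, false_iff]
    intro hc
    obtain ⟨h2, hev⟩ := canon_length hc
    simp only [Bool.or_eq_true, beq_iff_eq] at h
    omega
  · simp only [Bool.or_eq_true, beq_iff_eq, not_or] at h
    obtain ⟨h0, hodd⟩ := h
    have hev : s.toList.length % 2 = 0 := by omega
    have hlen : 1 ≤ s.toList.length / 2 := by omega
    have htn : ((s.toList.length : Int) / 2).toNat = s.toList.length / 2 := by omega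
    simp only [beq_iff_eq, htn]
    constructor
    · intro hs
      have hx := congrArg String.toList hs
      rw [String.toList_ofList] at hx
      exact ⟨s.toList.length / 2, hlen, hx⟩
    · rintro ⟨k, hk, hl⟩
      have hlk : s.toList.length = 2 * k := by rw [hl]; simp; omega
      have : s.toList.length / 2 = k := by omega
      rw [this]
      have := congrArg String.ofList hl
      simpa using this

-- ===== VERDICT (by name: the statement is the Claim_ definition above) =====
theorem is_0n1n_spec : Claim_equal_is_0n1n := by
  intro s _
  unfold Spec_is_0n1n
  have := (a_iff_canon s).trans (b_iff_canon s).symm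
  cases hA : is_0n1n s <;> cases hB : is_0n1n_alt s <;> simp_all
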